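-- pv_equiv track=rewrite | github.com/aws-samples/aws-genai-rag-workshop | lab04-advance-rag-agent/code/lambda_function.py | generate_plantuml_from_openapi
-- ===== SOURCE A (Python) =====
-- def generate_plantuml_from_openapi(yml_content):
--     """Generate PlantUML code from OpenAPI YAML content"""
--
--     plantuml = "@startuml\n"
--     plantuml += "!theme plain\n"
--     plantuml += "title API Flow Diagram\n\n"
--
--     lines = yml_content.split('\n')
--
--     # Extract API info
--     api_title = "API"
--     for line in lines:
--         if 'title:' in line:
--             api_title = line.split('title:')[1].strip().strip('"\'')
--             break
--
--     # Add main API component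
--     plantuml += f"participant Client\n"
--     plantuml += f"participant \"{api_title}\" as API\n"
--     plantuml += f"database \"Data Store\" as DB\n\n"
--
--     # Extract paths and generate sequence
--     in_paths = False
--     current_path = None
--
--     for line in lines:
--         line = line.strip()
--
--         if line == 'paths:':
--             in_paths = True
--             continue
--
--         if in_paths and line.startswith('/'):
--             current_path = line.rstrip(':')
--             plantuml += f"== {current_path} ==\n"
--
--         elif in_paths and line in ['get:', 'post:', 'put:', 'delete:', 'patch:']:
--             method = line.rstrip(':').upper()
--             plantuml += f"Client -> API: {method} {current_path}\n"
--             plantuml += f"API -> DB: Query/Update\n"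
--             plantuml += f"DB -> API: Response\n"
--             plantuml += f"API -> Client: HTTP Response\n\n"
--
--     # Add data models section
--     plantuml += "== Data Models ==\n"
--     plantuml += "note over API\n"
--     plantuml += "Data Models:\n"
--
--     # Extract schema info
--     in_components = False
--     for line in lines:
--         line = line.strip()
--         if line == 'components:' or line == 'definitions:':
--             in_components = True
--             continue
--         if in_components and line.endswith(':') and not line.startswith(' '):
--             schema_name = line.rstrip(':')
--             if schema_name not in ['schemas', 'properties', 'type', 'required']:
--                 plantuml += f"- {schema_name}\n"
--
--     plantuml += "end note\n"
--     plantuml += "@enduml"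
--
--     return plantuml
-- ===== SOURCE B (Python) =====
-- def generate_plantuml_from_openapi(yml_content):
--     """Generate PlantUML code from OpenAPI YAML content (single-pass rewrite)"""
--     lines = yml_content.split('\n')
--     api_title = None
--     in_paths = False
--     current_path = None
--     seq = []
--     in_components = False
--     models = []
--     for raw in lines:
--         if api_title is None and 'title:' in raw:
--             api_title = raw.split('title:')[1].strip().strip('"\'')
--         line = raw.strip()
--         # paths section
--         if line == 'paths:':
--             in_paths = True
--         elif in_paths and line.startswith('/'):
--             current_path = line.rstrip(':')
--             seq.append("== %s ==\n" % current_path)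
--         elif in_paths and line in ('get:', 'post:', 'put:', 'delete:', 'patch:'):
--             seq.append("Client -> API: %s %s\n"
--                        "API -> DB: Query/Update\n"
--                        "DB -> API: Response\n"
--                        "API -> Client: HTTP Response\n\n"
--                        % (line.rstrip(':').upper(), current_path))
--         # components section (independent flag, never reset)
--         if line == 'components:' or line == 'definitions:':
--             in_components = True
--         elif in_components and line.endswith(':') and not line.startswith(' '):
--             name = line.rstrip(':')
--             if name not in ('schemas', 'properties', 'type', 'required'):
--                 models.append("- %s\n" % name)
--     title = api_title if api_title is not None else "API"
--     return ("@startuml\n!theme plain\ntitle API Flow Diagram\n\n"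
--             "participant Client\n"
--             "participant \"%s\" as API\n"
--             "database \"Data Store\" as DB\n\n" % title
--             + "".join(seq)
--             + "== Data Models ==\nnote over API\nData Models:\n"
--             + "".join(models)
--             + "end note\n@enduml")
-- ===== Notes on version B (the rewrite author's own statement) =====
-- stated objective: alternative
-- what changed: A scans the line list three separate times (title, paths sequence, component schemas), each pass concatenating onto one growing string; B makes a single pass that carries the title option, paths state and components state together, collecting output fragments in two lists that are joined once during final assembly.
import Mathlib
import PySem

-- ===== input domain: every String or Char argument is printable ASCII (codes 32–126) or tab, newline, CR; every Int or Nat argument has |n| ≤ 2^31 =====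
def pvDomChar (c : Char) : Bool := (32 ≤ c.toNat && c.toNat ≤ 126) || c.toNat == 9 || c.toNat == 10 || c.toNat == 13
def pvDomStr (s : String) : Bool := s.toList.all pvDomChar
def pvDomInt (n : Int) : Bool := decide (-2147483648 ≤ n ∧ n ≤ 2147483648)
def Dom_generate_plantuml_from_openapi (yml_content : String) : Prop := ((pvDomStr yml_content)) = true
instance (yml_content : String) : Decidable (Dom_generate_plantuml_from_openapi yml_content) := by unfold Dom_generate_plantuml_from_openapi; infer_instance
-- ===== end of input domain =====

-- B replaces A's three sequential scans of the line list by ONE loop that carries the title, the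
-- paths state and the components state together and collects the output fragments in two lists,
-- assembling the string once at the end (objective: alternative decomposition, same cost).

-- ===== PORT A =====
-- shared primitive helpers (identical Python subexpressions in A and B)
-- s.rstrip(':') — drop every trailing ':' (exact; PySem has no right-strip-with-chars)
def pvRstripColon (s : String) : String :=
  String.ofList (s.toList.reverse.dropWhile (· == ':')).reverse
-- f-string rendering of the current_path variable: str(None) = "None"
def pvStrOfOpt : Option String → String
  | none => "None"
  | some p => p
-- line.split('title:')[1].strip().strip('"\'')  (the branch guard "'title:' in line"
-- guarantees the split has a second part, so the .getD "" default is never used)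
def pvTitleOf (line : String) : String :=
  PySem.Str.stripChars
    (PySem.Str.strip ((PySem.List.pyGet? ((PySem.Str.split? line "title:").getD []) 1).getD ""))
    "\"'"
-- line in ['get:', 'post:', 'put:', 'delete:', 'patch:']
def pvIsMethod (line : String) : Bool :=
  line == "get:" || line == "post:" || line == "put:" || line == "delete:" || line == "patch:"
-- schema_name not in ['schemas', 'properties', 'type', 'required']  (the excluded test)
def pvIsExcluded (name : String) : Bool :=
  name == "schemas" || name == "properties" || name == "type" || name == "required"

-- A's first loop: first line containing 'title:', with break; default "API"
def pvATitle : List String → String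
  | [] => "API"
  | l :: ls => if PySem.Str.isIn "title:" l then pvTitleOf l else pvATitle ls

-- A's second loop body; state = (in_paths, current_path, plantuml)
def pvAPathsStep (s : Bool × Option String × String) (raw : String) : Bool × Option String × String :=
  let line := PySem.Str.strip raw
  if line == "paths:" then (true, s.2.1, s.2.2)
  else if s.1 && PySem.Str.startswith line "/" then
    let cur := pvRstripColon line
    (s.1, some cur, s.2.2 ++ ("== " ++ cur ++ " ==\n"))
  else if s.1 && pvIsMethod line then
    (s.1, s.2.1, s.2.2 ++ ("Client -> API: " ++ PySem.Str.upper (pvRstripColon line) ++ " " ++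
      pvStrOfOpt s.2.1 ++ "\n" ++ "API -> DB: Query/Update\n" ++ "DB -> API: Response\n" ++
      "API -> Client: HTTP Response\n\n"))
  else s

-- A's third loop body; state = (in_components, plantuml)
def pvACompsStep (s : Bool × String) (raw : String) : Bool × String :=
  let line := PySem.Str.strip raw
  if line == "components:" || line == "definitions:" then (true, s.2)
  else if s.1 && PySem.Str.endswith line ":" && !PySem.Str.startswith line " " then
    let name := pvRstripColon line
    if !pvIsExcluded name then (s.1, s.2 ++ ("- " ++ name ++ "\n")) else s
  else s

def generate_plantuml_from_openapi (yml_content : String) : String :=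
  let plantuml := "@startuml\n" ++ "!theme plain\n" ++ "title API Flow Diagram\n\n"
  let lines := (PySem.Str.split? yml_content "\n").getD []   -- sep "\n" ≠ "", so never none
  let api_title := pvATitle lines
  let plantuml := plantuml ++ "participant Client\n" ++
    ("participant \"" ++ api_title ++ "\" as API\n") ++ "database \"Data Store\" as DB\n\n"
  let st := lines.foldl pvAPathsStep (false, none, plantuml)
  let plantuml := st.2.2 ++ "== Data Models ==\n" ++ "note over API\n" ++ "Data Models:\n"
  let st2 := lines.foldl pvACompsStep (false, plantuml)
  st2.2 ++ "end note\n" ++ "@enduml"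

-- ===== PORT B =====
structure PvBSt where
  title : Option String
  inPaths : Bool
  cur : Option String
  seq : List String
  inComp : Bool
  models : List String

def pvBStep (s : PvBSt) (raw : String) : PvBSt :=
  let s1 : PvBSt :=
    if s.title == none && PySem.Str.isIn "title:" raw then { s with title := some (pvTitleOf raw) }
    else s
  let line := PySem.Str.strip raw
  let s2 : PvBSt :=
    if line == "paths:" then { s1 with inPaths := true }
    else if s1.inPaths && PySem.Str.startswith line "/" then
      let cur := pvRstripColon line
      { s1 with cur := some cur, seq := s1.seq ++ ["== " ++ cur ++ " ==\n"] }
    else if s1.inPaths && pvIsMethod line then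
      { s1 with seq := s1.seq ++ ["Client -> API: " ++ PySem.Str.upper (pvRstripColon line) ++ " " ++
        pvStrOfOpt s1.cur ++ "\n" ++ "API -> DB: Query/Update\n" ++ "DB -> API: Response\n" ++
        "API -> Client: HTTP Response\n\n"] }
    else s1
  if line == "components:" || line == "definitions:" then { s2 with inComp := true }
  else if s2.inComp && PySem.Str.endswith line ":" && !PySem.Str.startswith line " " then
    let name := pvRstripColon line
    if !pvIsExcluded name then { s2 with models := s2.models ++ ["- " ++ name ++ "\n"] } else s2
  else s2

def generate_plantuml_from_openapi_alt (yml_content : String) : String :=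
  let lines := (PySem.Str.split? yml_content "\n").getD []   -- sep "\n" ≠ "", so never none
  let s := lines.foldl pvBStep ⟨none, false, none, [], false, []⟩
  let title := s.title.getD "API"
  "@startuml\n!theme plain\ntitle API Flow Diagram\n\nparticipant Client\nparticipant \"" ++ title ++
    "\" as API\ndatabase \"Data Store\" as DB\n\n" ++
    PySem.Str.join "" s.seq ++
    "== Data Models ==\nnote over API\nData Models:\n" ++
    PySem.Str.join "" s.models ++
    "end note\n@enduml"

-- ===== PRECONDITION & SPEC =====
def Spec_generate_plantuml_from_openapi (yml_content : String) (out : String) : Prop := out = generate_plantuml_from_openapi_alt yml_content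
instance (yml_content : String) (out : String) : Decidable (Spec_generate_plantuml_from_openapi yml_content out) := by unfold Spec_generate_plantuml_from_openapi; infer_instance

-- ===== CLAIM (what is proved, stated in full; the proofs are below) =====
def Claim_equal_generate_plantuml_from_openapi : Prop := ∀ (yml_content : String), Dom_generate_plantuml_from_openapi yml_content → Spec_generate_plantuml_from_openapi yml_content (generate_plantuml_from_openapi yml_content)

-- ===== LEMMAS AND PROOFS =====

-- componentwise views of B's single loop
def pvTF (t : Option String) (raw : String) : Option String :=
  if t == none && PySem.Str.isIn "title:" raw then some (pvTitleOf raw) else t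

def pvPF (s : Bool × Option String × List String) (raw : String) : Bool × Option String × List String :=
  let line := PySem.Str.strip raw
  if line == "paths:" then (true, s.2.1, s.2.2)
  else if s.1 && PySem.Str.startswith line "/" then
    let cur := pvRstripColon line
    (s.1, some cur, s.2.2 ++ ["== " ++ cur ++ " ==\n"])
  else if s.1 && pvIsMethod line then
    (s.1, s.2.1, s.2.2 ++ ["Client -> API: " ++ PySem.Str.upper (pvRstripColon line) ++ " " ++
      pvStrOfOpt s.2.1 ++ "\n" ++ "API -> DB: Query/Update\n" ++ "DB -> API: Response\n" ++
      "API -> Client: HTTP Response\n\n"])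
  else s

def pvCF (s : Bool × List String) (raw : String) : Bool × List String :=
  let line := PySem.Str.strip raw
  if line == "components:" || line == "definitions:" then (true, s.2)
  else if s.1 && PySem.Str.endswith line ":" && !PySem.Str.startswith line " " then
    let name := pvRstripColon line
    if !pvIsExcluded name then (s.1, s.2 ++ ["- " ++ name ++ "\n"]) else s
  else s

theorem pvJoin_nil : PySem.Str.join "" [] = "" := by
  simp [PySem.Str.join, PySem.Chars.join, List.intercalate]

theorem pvJoin_cons (x : String) (ys : List String) :
    PySem.Str.join "" (x :: ys) = x ++ PySem.Str.join "" ys := by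
  simp [PySem.Str.join, PySem.Chars.join, List.intercalate]
  cases ys with
  | nil => simp [String.ofList_toList]
  | cons y ys => simp [String.ofList_append, String.ofList_toList]

theorem pvBStep_decomp (s : PvBSt) (raw : String) :
    pvBStep s raw =
      ⟨pvTF s.title raw,
       (pvPF (s.inPaths, s.cur, s.seq) raw).1,
       (pvPF (s.inPaths, s.cur, s.seq) raw).2.1,
       (pvPF (s.inPaths, s.cur, s.seq) raw).2.2,
       (pvCF (s.inComp, s.models) raw).1,
       (pvCF (s.inComp, s.models) raw).2⟩ := by
  cases s
  simp only [pvBStep, pvTF, pvPF, pvCF]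
  split_ifs <;> rfl

theorem pvBFold_decomp (lines : List String) (s : PvBSt) :
    lines.foldl pvBStep s =
      ⟨lines.foldl pvTF s.title,
       (lines.foldl pvPF (s.inPaths, s.cur, s.seq)).1,
       (lines.foldl pvPF (s.inPaths, s.cur, s.seq)).2.1,
       (lines.foldl pvPF (s.inPaths, s.cur, s.seq)).2.2,
       (lines.foldl pvCF (s.inComp, s.models)).1,
       (lines.foldl pvCF (s.inComp, s.models)).2⟩ := by
  induction lines generalizing s with
  | nil => rfl
  | cons raw rest ih =>
      rw [List.foldl_cons, pvBStep_decomp, ih]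
      rfl

theorem pvTF_some (lines : List String) (x : String) :
    lines.foldl pvTF (some x) = some x := by
  induction lines with
  | nil => rfl
  | cons l ls ih => simpa [pvTF] using ih

theorem pvTitle_eq (lines : List String) :
    (lines.foldl pvTF none).getD "API" = pvATitle lines := by
  induction lines with
  | nil => rfl
  | cons l ls ih =>
      cases h : PySem.Str.isIn "title:" l with
      | true =>
          simp only [List.foldl_cons, pvTF, pvATitle, h]
          simp [pvTF_some]
      | false =>
          simp only [List.foldl_cons, pvTF, pvATitle, h]
          simpa using ih

theorem pvPF_seq_append (lines : List String) (ip : Bool) (c : Option String) (sq : List String) :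
    lines.foldl pvPF (ip, c, sq) =
      ((lines.foldl pvPF (ip, c, [])).1,
       (lines.foldl pvPF (ip, c, [])).2.1,
       sq ++ (lines.foldl pvPF (ip, c, [])).2.2) := by
  induction lines generalizing ip c sq with
  | nil => simp
  | cons raw rest ih =>
      simp only [List.foldl_cons, pvPF]
      split_ifs
      · rw [ih (sq := sq), ih (sq := ([] : List String))]
      · rw [ih (sq := sq ++ [_]), ih (sq := [] ++ [_]), ih (sq := ([] : List String))]
        simp
      · rw [ih (sq := sq ++ [_]), ih (sq := [] ++ [_]), ih (sq := ([] : List String))]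
        simp
      · rw [ih (sq := sq)]

theorem pvPaths_eq (lines : List String) (ip : Bool) (c : Option String) (a : String) :
    lines.foldl pvAPathsStep (ip, c, a) =
      ((lines.foldl pvPF (ip, c, [])).1,
       (lines.foldl pvPF (ip, c, [])).2.1,
       a ++ PySem.Str.join "" (lines.foldl pvPF (ip, c, [])).2.2) := by
  induction lines generalizing ip c a with
  | nil => simp [pvJoin_nil]
  | cons raw rest ih =>
      simp only [List.foldl_cons, pvAPathsStep, pvPF]
      split_ifs
      · rw [ih]
      · simp only [List.nil_append]
        rw [ih, pvPF_seq_append rest _ _ [_]]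
        simp [pvJoin_cons, String.append_assoc]
      · simp only [List.nil_append]
        rw [ih, pvPF_seq_append rest _ _ [_]]
        simp [pvJoin_cons, String.append_assoc]
      · rw [ih]

theorem pvCF_models_append (lines : List String) (ic : Bool) (md : List String) :
    lines.foldl pvCF (ic, md) =
      ((lines.foldl pvCF (ic, [])).1, md ++ (lines.foldl pvCF (ic, [])).2) := by
  induction lines generalizing ic md with
  | nil => simp
  | cons raw rest ih =>
      simp only [List.foldl_cons, pvCF]
      split_ifs
      · rw [ih (md := md), ih (md := ([] : List String))]
      · rw [ih (md := md ++ [_]), ih (md := [] ++ [_]), ih (md := ([] : List String))]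
        simp
      · rw [ih (md := md)]
      · rw [ih (md := md)]

theorem pvComps_eq (lines : List String) (ic : Bool) (a : String) :
    lines.foldl pvACompsStep (ic, a) =
      ((lines.foldl pvCF (ic, [])).1,
       a ++ PySem.Str.join "" (lines.foldl pvCF (ic, [])).2) := by
  induction lines generalizing ic a with
  | nil => simp [pvJoin_nil]
  | cons raw rest ih =>
      simp only [List.foldl_cons, pvACompsStep, pvCF]
      split_ifs
      · rw [ih]
      · simp only [List.nil_append]
        rw [ih, pvCF_models_append rest _ [_]]
        simp [pvJoin_cons, String.append_assoc]
      · rw [ih]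
      · rw [ih]

-- ===== VERDICT (by name: the statement is the Claim_ definition above) =====
theorem generate_plantuml_from_openapi_spec : Claim_equal_generate_plantuml_from_openapi := by
  intro yml _
  show generate_plantuml_from_openapi yml = generate_plantuml_from_openapi_alt yml
  simp only [generate_plantuml_from_openapi, generate_plantuml_from_openapi_alt]
  rw [pvBFold_decomp]
  rw [pvPaths_eq, pvComps_eq, pvTitle_eq]
  simp [String.append_assoc]
  rw [← String.append_assoc]
  congr 1
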